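-- pv_equiv track=rewrite | github.com/annab999/dpl-us-city-crimes | airflow/include/city_vars.py | parse_los
-- ===== SOURCE A (Python) =====
-- def parse_los(location):
--     """
--     parse street from LA given block of format 'NNN D STREET ST .. (usually)'
--     """
--     split = location.split()
--     for i in range(len(split)):
--         if split[i] in ['N', 'E', 'W', 'S']:
--             return " ".join(split[i+1:])
--     for i in range(len(split)):
--         if split[i].isdigit():
--             return " ".join(split[i+1:])
--     return " ".join(split[-1:])
-- ===== SOURCE B (Python) =====
-- def parse_los(location):
--     split = location.split()
--     first_digit = None
--     for i, tok in enumerate(split):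
--         if tok in ('N', 'E', 'W', 'S'):
--             return " ".join(split[i+1:])
--         if first_digit is None and tok.isdigit():
--             first_digit = i
--     if first_digit is not None:
--         return " ".join(split[first_digit+1:])
--     return " ".join(split[-1:])
-- ===== Notes on version B (the rewrite author's own statement) =====
-- stated objective: alternative
-- what changed: Fuses A's two sequential index loops over the token list into a single enumerate pass that records the first digit token while scanning for a direction token, preserving direction-over-digit priority.
import Mathlib
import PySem

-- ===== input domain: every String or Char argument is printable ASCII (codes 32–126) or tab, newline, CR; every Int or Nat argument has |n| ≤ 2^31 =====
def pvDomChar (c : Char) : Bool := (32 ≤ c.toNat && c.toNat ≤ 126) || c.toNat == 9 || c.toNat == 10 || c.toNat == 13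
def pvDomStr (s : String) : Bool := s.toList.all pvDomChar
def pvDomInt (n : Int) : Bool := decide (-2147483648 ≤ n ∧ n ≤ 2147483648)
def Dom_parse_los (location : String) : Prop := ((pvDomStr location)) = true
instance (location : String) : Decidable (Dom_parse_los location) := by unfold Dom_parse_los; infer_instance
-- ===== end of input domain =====

-- B fuses A's two sequential index loops into one enumerate pass recording the first digit token; same results.

-- ===== PORT A =====
-- A's 'for i in range(len(split)): if p(split[i]): return …' loop: recursion over the
-- remaining tokens carrying the current index, returning the index of the first hit.
def pvFind (p : String → Bool) : List String → Nat → Option Nat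
  | [], _ => none
  | x :: xs, i => if p x then some i else pvFind p xs (i + 1)

def parse_los (location : String) : String :=
  let split := PySem.Str.split₀ location
  match pvFind (fun t => (["N", "E", "W", "S"] : List String).contains t) split 0 with
  | some i => PySem.Str.join " " (PySem.List.slice split (some ((i : Int) + 1)) none)
  | none =>
    match pvFind PySem.Str.strIsdigit split 0 with
    | some i => PySem.Str.join " " (PySem.List.slice split (some ((i : Int) + 1)) none)
    | none => PySem.Str.join " " (PySem.List.slice split (some (-1)) none)

-- ===== PORT B =====
-- Source B's single loop: walk the tokens with index i and accumulator first_digit (fd).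
def pvBLoop (split : List String) : List String → Nat → Option Nat → String
  | [], _, fd =>
    match fd with
    | some j => PySem.Str.join " " (PySem.List.slice split (some ((j : Int) + 1)) none)
    | none => PySem.Str.join " " (PySem.List.slice split (some (-1)) none)
  | t :: rest, i, fd =>
    if (["N", "E", "W", "S"] : List String).contains t then
      PySem.Str.join " " (PySem.List.slice split (some ((i : Int) + 1)) none)
    else
      pvBLoop split rest (i + 1)
        (if fd.isNone && PySem.Str.strIsdigit t then some i else fd)

def parse_los_alt (location : String) : String :=
  let split := PySem.Str.split₀ location
  pvBLoop split split 0 none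

-- ===== PRECONDITION & SPEC =====
def Spec_parse_los (location : String) (out : String) : Prop := out = parse_los_alt location
instance (location : String) (out : String) : Decidable (Spec_parse_los location out) := by unfold Spec_parse_los; infer_instance

-- ===== CLAIM (what is proved, stated in full; the proofs are below) =====
def Claim_equal_parse_los : Prop := ∀ (location : String), Dom_parse_los location → Spec_parse_los location (parse_los location)

-- ===== LEMMAS AND PROOFS =====
-- Invariant of the fused loop: scanning suffix xs at index i with accumulator fd equals
-- "first direction hit in xs, else fd-or-first-digit-hit in xs, else the tail fallback".
lemma pvBLoop_eq (split : List String) : ∀ (xs : List String) (i : Nat) (fd : Option Nat),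
    pvBLoop split xs i fd =
      match pvFind (fun t => (["N", "E", "W", "S"] : List String).contains t) xs i with
      | some j => PySem.Str.join " " (PySem.List.slice split (some ((j : Int) + 1)) none)
      | none =>
        match (match fd with | some k => some k | none => pvFind PySem.Str.strIsdigit xs i) with
        | some j => PySem.Str.join " " (PySem.List.slice split (some ((j : Int) + 1)) none)
        | none => PySem.Str.join " " (PySem.List.slice split (some (-1)) none) := by
  intro xs
  induction xs with
  | nil => intro i fd; cases fd <;> simp [pvBLoop, pvFind]
  | cons t rest ih =>
    intro i fd
    by_cases hd : t = "N" ∨ t = "E" ∨ t = "W" ∨ t = "S"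
    · simp [pvBLoop, pvFind, hd]
    · cases fd with
      | some k => simp [pvBLoop, pvFind, hd, ih]
      | none =>
        by_cases hg : PySem.Chars.strIsdigit t.toList = true
        · simp [pvBLoop, pvFind, hd, hg, ih]
        · simp [pvBLoop, pvFind, hd, hg, ih]

-- ===== VERDICT (by name: the statement is the Claim_ definition above) =====
theorem parse_los_spec : Claim_equal_parse_los := by
  intro location _
  unfold Spec_parse_los parse_los parse_los_alt
  rw [pvBLoop_eq]
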